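-- pv_equiv track=rewrite | github.com/KRchaeeun/Cool_Hot_ALGO | jhLim/s2_3085_사탕 게임.py | fy
-- ===== SOURCE A (Python) =====
-- def fy(arr, N):
--     max_cnt = 0
--     for y in range(N):
--         cnt = 1
--         for x in range(N-1):
--             if arr[x][y] == arr[x+1][y]:
--                 cnt += 1
--             else:
--                 cnt = 1
--
--             if max_cnt < cnt:
--                 max_cnt = cnt
--
--     return max_cnt
-- ===== SOURCE B (Python) =====
-- def fy(arr, N):
--     # Group/reduce over a derived adjacency-equality vector instead of an
--     # incremental reset-counter: per column, the answer is 1 + the longest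
--     # run of consecutive True values in eqs (when eqs is non-empty).
--     def run_lengths(bits):
--         if not bits:
--             return []
--         head, rest = bits[0], bits[1:]
--         i = 0
--         while i < len(rest) and rest[i] == head:
--             i += 1
--         return [(head, 1 + i)] + run_lengths(rest[i:])
--
--     best = 0
--     for y in range(N):
--         eqs = [arr[x][y] == arr[x + 1][y] for x in range(N - 1)]
--         if eqs:
--             longest_true = max((n for v, n in run_lengths(eqs) if v), default=0)
--             best = max(best, longest_true + 1)
--     return best
-- ===== Notes on version B (the rewrite author's own statement) =====
-- stated objective: alternative
-- what changed: Per column, B builds the adjacency-equality vector eqs[x] = (arr[x][y]==arr[x+1][y]) and reduces it by run-length grouping (longest True run + 1), instead of A's incremental reset-counter with an interleaved running maximum.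
import Mathlib
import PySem

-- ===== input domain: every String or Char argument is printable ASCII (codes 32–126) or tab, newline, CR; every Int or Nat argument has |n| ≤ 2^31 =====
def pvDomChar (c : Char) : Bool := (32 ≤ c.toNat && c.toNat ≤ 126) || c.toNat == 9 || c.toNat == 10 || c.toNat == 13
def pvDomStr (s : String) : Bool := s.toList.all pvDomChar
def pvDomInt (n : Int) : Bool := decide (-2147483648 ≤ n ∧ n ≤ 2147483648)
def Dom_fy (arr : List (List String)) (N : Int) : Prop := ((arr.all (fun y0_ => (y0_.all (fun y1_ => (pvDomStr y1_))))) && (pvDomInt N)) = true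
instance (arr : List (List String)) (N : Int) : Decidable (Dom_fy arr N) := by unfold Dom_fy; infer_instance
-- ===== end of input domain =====

-- B replaces A's incremental reset-counter with a per-column adjacency-equality
-- vector reduced by run-length grouping (objective: alternative decomposition).

-- shared helper for the expression arr[x][y] of both Pythons; exact whenever the
-- indices are in range (Pre_fy guarantees that; out of range Python raises IndexError)
def cell (arr : List (List String)) (x y : Int) : String :=
  (PySem.List.pyGet? ((PySem.List.pyGet? arr x).getD []) y).getD ""

-- ===== PORT A =====
-- the body of A's inner loop: cnt update, then conditional max_cnt update
def stepA (s : Int × Int) (b : Bool) : Int × Int :=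
  let cnt := if b then s.2 + 1 else 1
  (if s.1 < cnt then cnt else s.1, cnt)

def fy (arr : List (List String)) (N : Int) : Int :=
  (PySem.List.pyRange 0 N 1).foldl (fun max_cnt y =>
    ((PySem.List.pyRange 0 (N - 1) 1).foldl
      (fun s x => stepA s (cell arr x y == cell arr (x + 1) y)) (max_cnt, 1)).1) 0

-- ===== PORT B =====
-- run_lengths: leading group (takeWhile/dropWhile transcribe the index-scanning while loop), then recurse
def runLengths : List Bool → List (Bool × Int)
  | [] => []
  | b :: rest =>
      (b, 1 + ((rest.takeWhile (· == b)).length : Int)) ::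
        runLengths (rest.dropWhile (· == b))
termination_by l => l.length
decreasing_by simpa using Nat.lt_succ_of_le (List.length_dropWhile_le _ _)

-- max((n for v, n in rl if v), default=0); exact since every group length is ≥ 1 > 0
def maxTrue (rl : List (Bool × Int)) : Int :=
  (rl.filterMap (fun p => if p.1 then some p.2 else none)).foldl max 0

def fy_alt (arr : List (List String)) (N : Int) : Int :=
  (PySem.List.pyRange 0 N 1).foldl (fun best y =>
    let eqs := (PySem.List.pyRange 0 (N - 1) 1).map
      (fun x => cell arr x y == cell arr (x + 1) y)
    if eqs.isEmpty then best else max best (maxTrue (runLengths eqs) + 1)) 0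

-- ===== PRECONDITION & SPEC =====
-- exactly the inputs on which Python A returns (no IndexError): when N ≥ 2 it reads
-- arr[x][y] for all 0 ≤ x,y ≤ N-1, so the first N rows must exist and have length ≥ N
def Pre_fy (arr : List (List String)) (N : Int) : Prop :=
  2 ≤ N → (N ≤ (arr.length : Int) ∧ ∀ r ∈ arr.take N.toNat, N ≤ (r.length : Int))
instance (arr : List (List String)) (N : Int) : Decidable (Pre_fy arr N) := by
  unfold Pre_fy; infer_instance

def pvWitness_fy : List (List String) × Int := ([["a", "a"], ["a", "b"]], 2)

def Spec_fy (arr : List (List String)) (N : Int) (out : Int) : Prop := out = fy_alt arr N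
instance (arr : List (List String)) (N : Int) (out : Int) : Decidable (Spec_fy arr N out) := by unfold Spec_fy; infer_instance

-- ===== CLAIM (what is proved, stated in full; the proofs are below) =====
def Claim_equal_fy : Prop := ∀ (arr : List (List String)) (N : Int), Dom_fy arr N → Pre_fy arr N → Spec_fy arr N (fy arr N)

-- ===== LEMMAS AND PROOFS =====

theorem runLengths_nil : runLengths [] = [] := by rw [runLengths]

theorem runLengths_cons (b : Bool) (rest : List Bool) :
    runLengths (b :: rest) =
      (b, 1 + ((rest.takeWhile (· == b)).length : Int)) ::
        runLengths (rest.dropWhile (· == b)) := by rw [runLengths]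

theorem max_max_one (m v : Int) (h : 0 ≤ v) :
    max (max m 1) (v + 1) = max m (v + 1) := by
  rw [max_assoc, max_eq_right (by omega : (1 : Int) ≤ v + 1)]

theorem foldl_max_max (l : List Int) (a b : Int) :
    l.foldl max (max a b) = max a (l.foldl max b) := by
  induction l generalizing b with
  | nil => rfl
  | cons x t ih => simpa [max_assoc] using ih (max b x)

theorem le_foldl_max (l : List Int) (a : Int) : a ≤ l.foldl max a := by
  induction l generalizing a with
  | nil => simp
  | cons x t ih => exact le_trans (le_max_left a x) (ih _)

theorem maxTrue_nonneg (rl : List (Bool × Int)) : 0 ≤ maxTrue rl :=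
  le_foldl_max _ 0

theorem maxTrue_true_cons (v : Int) (rl : List (Bool × Int)) :
    maxTrue ((true, v) :: rl) = max v (maxTrue rl) := by
  simp only [maxTrue, List.filterMap_cons, if_pos, List.foldl_cons]
  rw [max_comm 0 v, foldl_max_max]

theorem maxTrue_false_cons (v : Int) (rl : List (Bool × Int)) :
    maxTrue ((false, v) :: rl) = maxTrue rl := by
  simp [maxTrue]

-- dropping a leading false (or leading falses) does not change the longest true run
theorem mt_dropWhile_false (x : List Bool) :
    maxTrue (runLengths (x.dropWhile (· == false))) = maxTrue (runLengths x) := by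
  cases x with
  | nil => rfl
  | cons b t =>
    cases b with
    | true => simp [List.dropWhile]
    | false =>
      rw [runLengths_cons, maxTrue_false_cons]
      simp [List.dropWhile]

theorem mt_false_cons (x : List Bool) :
    maxTrue (runLengths (false :: x)) = maxTrue (runLengths x) := by
  rw [runLengths_cons, maxTrue_false_cons]
  simpa using mt_dropWhile_false x

theorem stepA_false (s : Int × Int) : stepA s false = (max s.1 1, 1) := by
  simp [stepA, max_def]; omega

theorem stepA_true (s : Int × Int) : stepA s true = (max s.1 (s.2 + 1), s.2 + 1) := by
  simp [stepA, max_def]; omega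

-- processing a block of k+1 consecutive trues pushes the counter to c + k + 1
theorem foldl_replicate_true (k : ℕ) (e : List Bool) (m c : Int) :
    (List.replicate (k + 1) true ++ e).foldl stepA (m, c) =
      e.foldl stepA (max m (c + k + 1), c + k + 1) := by
  induction k generalizing m c with
  | zero => simp [stepA_true]
  | succ k ih =>
    have : (List.replicate (k + 1 + 1) true ++ e) =
        true :: (List.replicate (k + 1) true ++ e) := by
      simp [List.replicate_succ]
    rw [this, List.foldl_cons, stepA_true, ih]
    have h1 : max (max m (c + 1)) (c + 1 + (k : Int) + 1) = max m (c + (k + 1 : ℕ) + 1) := by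
      push_cast; rw [max_assoc]; congr 1; omega
    have h2 : c + 1 + (k : Int) + 1 = c + ((k + 1 : ℕ) : Int) + 1 := by push_cast; omega
    rw [h1, h2]

theorem takeWhile_true_replicate (l : List Bool) :
    l.takeWhile (· == true) = List.replicate (l.takeWhile (· == true)).length true := by
  rw [List.eq_replicate_iff]
  exact ⟨rfl, fun b hb => by simpa using List.mem_takeWhile_imp hb⟩

theorem dropWhile_head_false (l : List Bool) (p : Bool → Bool) (b : Bool) (t : List Bool)
    (h : l.dropWhile p = b :: t) : p b = false := by
  induction l with
  | nil => simp at h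
  | cons x xs ih =>
    rw [List.dropWhile] at h
    cases hp : p x with
    | true => rw [hp] at h; exact ih (by simpa using h)
    | false => rw [hp] at h; cases h; exact hp

-- the key per-column lemma: A's reset-counter fold equals B's run-length reduction
theorem key : ∀ (n : ℕ) (e : List Bool), e.length ≤ n → ∀ (m : Int),
    (e.foldl stepA (m, 1)).1 =
      if e.isEmpty then m else max m (maxTrue (runLengths e) + 1) := by
  intro n
  induction n with
  | zero =>
    intro e he m
    have : e = [] := List.length_eq_zero_iff.1 (Nat.le_zero.mp he)
    subst this; simp
  | succ n ih =>
    intro e he m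
    cases e with
    | nil => simp
    | cons b t =>
      cases b with
      | false =>
        rw [List.foldl_cons, stepA_false]
        rw [ih t (by simpa using Nat.le_of_succ_le_succ he) (max (m, 1).1 1)]
        cases t with
        | nil =>
          simp [runLengths_cons, runLengths_nil, maxTrue]
        | cons b' t' =>
          simp only [List.isEmpty_cons, mt_false_cons]
          exact max_max_one m _ (maxTrue_nonneg _)
      | true =>
        -- decompose the leading true block
        set tw := t.takeWhile (· == true) with htw
        set dw := t.dropWhile (· == true) with hdw
        have hsplit : true :: t = List.replicate (tw.length + 1) true ++ dw := by
          rw [List.replicate_succ]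
          simp only [List.cons_append]
          congr 1
          rw [htw, hdw]
          conv_lhs => rw [← List.takeWhile_append_dropWhile (p := (· == true)) (l := t)]
          congr 1
          exact takeWhile_true_replicate t
        have hL : (true :: t).foldl stepA (m, 1) =
            dw.foldl stepA (max m (1 + (tw.length : Int) + 1), 1 + (tw.length : Int) + 1) := by
          rw [hsplit, foldl_replicate_true]
        rw [hL]
        have hrl : runLengths (true :: t) = (true, 1 + (tw.length : Int)) :: runLengths dw := by
          rw [runLengths_cons, htw, hdw]
        have hlen : dw.length ≤ t.length := List.length_dropWhile_le _ _
        cases hdwc : dw with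
        | nil =>
          simp only [List.foldl_nil, List.isEmpty_cons]
          rw [hrl, hdwc, maxTrue_true_cons, runLengths_nil]
          simp only [maxTrue, List.filterMap_nil, List.foldl_nil]
          rw [max_eq_left (by positivity : (0 : Int) ≤ 1 + (tw.length : Int))]
          simp
        | cons b' t' =>
          have hb' : b' = false := by
            have := dropWhile_head_false t (· == true) b' t' (hdw ▸ hdwc)
            simpa using this
          subst hb'
          rw [List.foldl_cons, stepA_false]
          have hM : max (max m ((1 : Int) + (tw.length : Int) + 1)) 1 =
              max m (1 + (tw.length : Int) + 1) := by
            rw [max_eq_left]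
            exact le_trans (by omega) (le_max_right m _)
          simp only [hM]
          have ht'len : t'.length ≤ n := by
            have h2 : dw.length ≤ n := le_trans hlen (by simpa using Nat.le_of_succ_le_succ he)
            rw [hdwc, List.length_cons] at h2; omega
          rw [ih t' ht'len]
          rw [hrl, hdwc, maxTrue_true_cons, mt_false_cons]
          cases t' with
          | nil =>
            simp only [List.isEmpty_nil, if_true, List.isEmpty_cons, runLengths_nil]
            simp only [maxTrue, List.filterMap_nil, List.foldl_nil]
            rw [max_eq_left (by positivity : (0 : Int) ≤ 1 + (tw.length : Int))]
            simp
          | cons b'' t'' =>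
            simp only [List.isEmpty_cons]
            have h0 := maxTrue_nonneg (runLengths (b'' :: t''))
            have h1 : max (1 + (tw.length : Int)) (maxTrue (runLengths (b'' :: t''))) + 1 =
                max (1 + (tw.length : Int) + 1) (maxTrue (runLengths (b'' :: t'')) + 1) := by
              simp only [max_def]; split_ifs <;> omega
            rw [h1, ← max_assoc]
            simp

theorem inner_eq (arr : List (List String)) (N : Int) (m y : Int) :
    ((PySem.List.pyRange 0 (N - 1) 1).foldl
      (fun s x => stepA s (cell arr x y == cell arr (x + 1) y)) (m, 1)).1 =
    (let eqs := (PySem.List.pyRange 0 (N - 1) 1).map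
        (fun x => cell arr x y == cell arr (x + 1) y)
     if eqs.isEmpty then m else max m (maxTrue (runLengths eqs) + 1)) := by
  rw [← List.foldl_map]
  exact key _ _ le_rfl m

-- ===== VERDICT (by name: the statement is the Claim_ definition above) =====
theorem fy_spec : Claim_equal_fy := by
  intro arr N _ _
  unfold Spec_fy fy fy_alt
  apply PySem.List.foldl_congr_mem
  intro m y _
  exact inner_eq arr N m y
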